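-- pv_equiv track=rewrite | github.com/TROLlox78/2015adventofcode | day 5/2015_naughtywords.py | xyxfinder
-- ===== SOURCE A (Python) =====
-- def xyxfinder(word):
--     templist=[]
--     for i in word:
--         templist.append(i)
--     for i in range(0,len(templist)-2):
--         if templist[i] == templist[i+2]:
--             return 1
--     return 0
-- ===== SOURCE B (Python) =====
-- def xyxfinder(word):
--     # Partition characters by index parity: chars two apart in `word`
--     # are exactly the adjacent chars within the same parity bucket.
--     even = []
--     odd = []
--     use_even = True
--     for ch in word:
--         if use_even:
--             even.append(ch)
--         else:
--             odd.append(ch)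
--         use_even = not use_even
--     # A bucket contains an adjacent duplicate iff it has fewer runs
--     # (maximal blocks of equal chars) than characters.
--     found = 0
--     for sub in (even, odd):
--         runs = 0
--         prev = None
--         for ch in sub:
--             if ch != prev:
--                 runs += 1
--             prev = ch
--         if runs < len(sub):
--             found = 1
--     return found
-- ===== Notes on version B (the rewrite author's own statement) =====
-- stated objective: alternative
-- what changed: Instead of copying to a temp list and scanning indices i vs i+2 with early return, B partitions the characters into even- and odd-index buckets and detects the pattern by run-length counting: a bucket has an adjacent duplicate (= a char repeated two apart in the word) iff its number of runs is smaller than its length.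
import Mathlib
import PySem

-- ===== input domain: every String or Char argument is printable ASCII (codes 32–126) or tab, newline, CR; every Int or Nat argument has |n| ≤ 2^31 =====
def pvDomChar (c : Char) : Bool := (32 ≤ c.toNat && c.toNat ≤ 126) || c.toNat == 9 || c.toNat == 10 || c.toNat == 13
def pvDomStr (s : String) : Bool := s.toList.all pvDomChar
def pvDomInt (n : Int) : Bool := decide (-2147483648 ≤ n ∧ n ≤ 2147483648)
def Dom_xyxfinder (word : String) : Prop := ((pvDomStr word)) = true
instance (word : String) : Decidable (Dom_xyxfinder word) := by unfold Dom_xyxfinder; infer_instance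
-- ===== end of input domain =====

-- B replaces A's temp-list copy and i/i+2 index scan by a parity partition of the
-- characters plus run-length counting in each bucket (alternative algorithm; same cost).

-- ===== PORT A =====
-- the 'for i in range(...): if ...: return 1' loop, with early return
def xyxfinderLoop (tl : List Char) : List Int → Int
  | [] => 0
  | i :: rest =>
    if PySem.List.pyGet? tl i = PySem.List.pyGet? tl (i + 2) then 1
    else xyxfinderLoop tl rest

def xyxfinder (word : String) : Int :=
  let templist := word.toList.foldl (fun acc c => acc ++ [c]) []
  xyxfinderLoop templist (PySem.List.pyRange 0 ((templist.length : Int) - 2) 1)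

-- ===== PORT B =====
-- 'for ch in word: append to even/odd; use_even = not use_even'
def pvPart : List Char → Bool → List Char → List Char → List Char × List Char
  | [], _, e, o => (e, o)
  | c :: t, useE, e, o =>
    if useE then pvPart t (!useE) (e ++ [c]) o else pvPart t (!useE) e (o ++ [c])

-- 'runs = 0; prev = None; for ch in sub: if ch != prev: runs += 1; prev = ch'
def pvRunsAux : List Char → Int → Option Char → Int
  | [], cnt, _ => cnt
  | c :: t, cnt, prev => pvRunsAux t (if some c ≠ prev then cnt + 1 else cnt) (some c)

def xyxfinder_alt (word : String) : Int :=
  let p := pvPart word.toList true [] []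
  [p.1, p.2].foldl (fun found sub =>
    if pvRunsAux sub 0 none < (sub.length : Int) then 1 else found) 0

-- ===== PRECONDITION & SPEC =====
def Spec_xyxfinder (word : String) (out : Int) : Prop := out = xyxfinder_alt word
instance (word : String) (out : Int) : Decidable (Spec_xyxfinder word out) := by unfold Spec_xyxfinder; infer_instance

-- ===== CLAIM (what is proved, stated in full; the proofs are below) =====
def Claim_equal_xyxfinder : Prop := ∀ (word : String), Dom_xyxfinder word → Spec_xyxfinder word (xyxfinder word)

-- ===== LEMMAS AND PROOFS =====

-- every-other-character subsequence; the odd bucket is pvEvens l.tail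
def pvEvens : List Char → List Char
  | [] => []
  | a :: t => a :: pvEvens t.tail
termination_by l => l.length
decreasing_by simp

lemma evens_nil : pvEvens ([] : List Char) = [] := by rw [pvEvens]

lemma evens_cons (a : Char) (t : List Char) : pvEvens (a :: t) = a :: pvEvens t.tail := by
  rw [pvEvens]

-- canonical middle predicate: some character equals the one two places later
def pvPany (l : List Char) : Bool := (l.zip (l.drop 2)).any (fun p => p.1 = p.2)

-- adjacent duplicate predicate
def pvAdj (l : List Char) : Bool := (l.zip l.tail).any (fun p => p.1 = p.2)

lemma foldl_append_id (l : List Char) (acc : List Char) :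
    List.foldl (fun acc c => acc ++ [c]) acc l = acc ++ l := by
  induction l generalizing acc with
  | nil => simp
  | cons a t ih => simp [List.foldl, ih]

lemma loop_eq_exists (tl : List Char) (idxs : List Int) :
    xyxfinderLoop tl idxs =
      if ∃ i ∈ idxs, PySem.List.pyGet? tl i = PySem.List.pyGet? tl (i + 2) then 1 else 0 := by
  induction idxs with
  | nil => simp [xyxfinderLoop]
  | cons i rest ih =>
    by_cases h : PySem.List.pyGet? tl i = PySem.List.pyGet? tl (i + 2)
    · simp [xyxfinderLoop, h]
    · simp [xyxfinderLoop, h, ih]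

lemma key (l : List Char) :
    (∃ i ∈ PySem.List.pyRange 0 ((l.length : Int) - 2) 1,
        PySem.List.pyGet? l i = PySem.List.pyGet? l (i + 2))
      ↔ pvPany l = true := by
  rw [pvPany, List.any_eq_true]
  constructor
  · rintro ⟨i, hmem, heq⟩
    rw [PySem.List.mem_pyRange_one] at hmem
    obtain ⟨h0, h2⟩ := hmem
    set j : Nat := i.toNat with hj
    have hi : i = (j : Int) := by omega
    have hjlen : j + 2 < l.length := by omega
    have hjz : j < (l.zip (l.drop 2)).length := by
      simp [List.length_zip]; omega
    refine ⟨(l.zip (l.drop 2))[j], List.getElem_mem hjz, ?_⟩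
    have hg : (l.zip (l.drop 2))[j] = (l[j], l[j + 2]) := by
      simp [List.getElem_zip, List.getElem_drop, Nat.add_comm]
    rw [hi] at heq
    have h2' : (j : Int) + 2 = ((j + 2 : Nat) : Int) := by push_cast; ring
    rw [h2', PySem.List.pyGet?_natCast, PySem.List.pyGet?_natCast] at heq
    rw [List.getElem?_eq_getElem (by omega), List.getElem?_eq_getElem hjlen] at heq
    simp at heq
    rw [hg]
    simpa using heq
  · rintro ⟨p, hmem, heq⟩
    obtain ⟨j, hjz, hg⟩ := List.mem_iff_getElem.mp hmem
    have hjlen : j + 2 < l.length := by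
      simp [List.length_zip] at hjz; omega
    refine ⟨(j : Int), ?_, ?_⟩
    · rw [PySem.List.mem_pyRange_one]; omega
    · have h2' : (j : Int) + 2 = ((j + 2 : Nat) : Int) := by push_cast; ring
      rw [h2', PySem.List.pyGet?_natCast, PySem.List.pyGet?_natCast]
      rw [List.getElem?_eq_getElem (by omega), List.getElem?_eq_getElem hjlen]
      have : (l.zip (l.drop 2))[j] = (l[j], l[j + 2]) := by
        simp [List.getElem_zip, List.getElem_drop, Nat.add_comm]
      rw [this] at hg
      subst hg
      simp at heq
      simp [heq]

-- A as an if over the canonical predicate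
lemma a_char (word : String) :
    xyxfinder word = if pvPany word.toList then 1 else 0 := by
  unfold xyxfinder
  rw [foldl_append_id, List.nil_append, loop_eq_exists]
  by_cases h : pvPany word.toList = true
  · rw [if_pos ((key word.toList).mpr h), h]; rfl
  · rw [if_neg (fun hc => h ((key word.toList).mp hc))]
    simp only [Bool.not_eq_true] at h
    rw [h]; rfl

-- ---- the partition builds the two parity subsequences ----
lemma part_spec (l : List Char) (b : Bool) (e o : List Char) :
    pvPart l b e o =
      if b then (e ++ pvEvens l, o ++ pvEvens l.tail)
      else (e ++ pvEvens l.tail, o ++ pvEvens l) := by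
  induction l generalizing b e o with
  | nil => cases b <;> simp [pvPart, evens_nil]
  | cons a t ih =>
    cases b with
    | true =>
      have hstep : pvPart (a :: t) true e o = pvPart t false (e ++ [a]) o := by
        simp [pvPart]
      rw [hstep, ih]
      simp [evens_cons]
    | false =>
      have hstep : pvPart (a :: t) false e o = pvPart t true e (o ++ [a]) := by
        simp [pvPart]
      rw [hstep, ih]
      simp [evens_cons]

-- ---- run counting characterises adjacent duplicates ----
lemma runs_shift (s : List Char) (c : Int) (p : Option Char) :
    pvRunsAux s c p = c + pvRunsAux s 0 p := by
  induction s generalizing c p with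
  | nil => simp [pvRunsAux]
  | cons a t ih =>
    simp only [pvRunsAux]
    by_cases h : some a ≠ p
    · rw [if_pos h, if_pos h, ih (c + 1) (some a), ih (0 + 1) (some a)]; ring
    · rw [if_neg h, if_neg h, ih c (some a)]

lemma runs_le (s : List Char) (p : Option Char) :
    pvRunsAux s 0 p ≤ (s.length : Int) := by
  induction s generalizing p with
  | nil => simp [pvRunsAux]
  | cons a t ih =>
    simp only [pvRunsAux, List.length_cons]
    rw [runs_shift]
    have := ih (some a)
    push_cast
    split_ifs <;> omega

lemma adj_cons (a : Char) (s : List Char) :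
    pvAdj (a :: s) = (decide (s.head? = some a) || pvAdj s) := by
  cases s with
  | nil => simp [pvAdj]
  | cons b t =>
    simp only [pvAdj, List.tail_cons, List.zip_cons_cons, List.any_cons, List.head?_cons,
      Option.some.injEq]
    by_cases h : a = b
    · subst h; simp
    · have h2 : ¬ (b = a) := fun hh => h hh.symm
      simp [h, h2]

lemma runs_lt_iff (s : List Char) (p : Option Char) :
    (pvRunsAux s 0 p < (s.length : Int)) ↔ ((s.head? = p ∧ p ≠ none) ∨ pvAdj s = true) := by
  induction s generalizing p with
  | nil => simp [pvRunsAux, pvAdj, eq_comm]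
  | cons a t ih =>
    simp only [pvRunsAux, List.head?_cons, List.length_cons]
    by_cases h : some a ≠ p
    · rw [if_pos h, runs_shift, adj_cons]
      have hiff := ih (some a)
      have hle := runs_le t (some a)
      constructor
      · intro hlt
        have hlt' : pvRunsAux t 0 (some a) < (t.length : Int) := by push_cast at hlt; omega
        rcases hiff.mp hlt' with ⟨h1, _⟩ | h2
        · exact Or.inr (by simp [h1])
        · exact Or.inr (by simp [h2])
      · rintro (⟨h1, _⟩ | h2)
        · exact absurd h1 h
        · simp only [Bool.or_eq_true, decide_eq_true_eq] at h2
          have hlt' : pvRunsAux t 0 (some a) < (t.length : Int) := hiff.mpr (by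
            rcases h2 with h2 | h2
            · exact Or.inl ⟨h2, by simp⟩
            · exact Or.inr h2)
          push_cast
          omega
    · rw [if_neg h]
      have h : some a = p := not_ne_iff.mp h
      have hle := runs_le t (some a)
      constructor
      · intro _
        exact Or.inl ⟨h, by rw [← h]; simp⟩
      · intro _
        push_cast
        omega

lemma runs_lt_none (s : List Char) :
    (pvRunsAux s 0 none < (s.length : Int)) ↔ pvAdj s = true := by
  rw [runs_lt_iff]; simp

-- ---- interleave: adjacent dup in a parity bucket ↔ x_x pattern in the word ----
lemma evens_head (l : List Char) : (pvEvens l).head? = l.head? := by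
  cases l with
  | nil => simp [evens_nil]
  | cons a t => simp [evens_cons]

lemma pany_cons (a : Char) (l : List Char) :
    pvPany (a :: l) = (decide (l.tail.head? = some a) || pvPany l) := by
  cases l with
  | nil => simp [pvPany]
  | cons b t =>
    cases t with
    | nil => simp [pvPany]
    | cons c u =>
      simp only [pvPany, List.drop_succ_cons, List.drop_zero, List.tail_cons,
        List.zip_cons_cons, List.any_cons, List.head?_cons, Option.some.injEq]
      by_cases h : a = c
      · subst h; simp
      · have h2 : ¬ (c = a) := fun hh => h hh.symm
        simp [h, h2]

lemma interleave (l : List Char) :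
    (pvAdj (pvEvens l) || pvAdj (pvEvens l.tail)) = pvPany l := by
  induction l with
  | nil => simp [evens_nil, pvAdj, pvPany]
  | cons a t ih =>
    rw [List.tail_cons, evens_cons, adj_cons, evens_head, pany_cons, ← ih]
    cases hb : decide (t.tail.head? = some a) <;>
      cases hx : pvAdj (pvEvens t.tail) <;> cases hy : pvAdj (pvEvens t) <;> simp_all

-- ===== VERDICT (by name: the statement is the Claim_ definition above) =====
theorem xyxfinder_spec : Claim_equal_xyxfinder := by
  intro word _
  unfold Spec_xyxfinder
  rw [a_char]
  unfold xyxfinder_alt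
  rw [part_spec]
  simp only [if_true, List.nil_append, List.foldl_cons, List.foldl_nil]
  rw [← interleave word.toList]
  have hE := runs_lt_none (pvEvens word.toList)
  have hO := runs_lt_none (pvEvens word.toList.tail)
  by_cases he : pvAdj (pvEvens word.toList) = true <;>
    by_cases ho : pvAdj (pvEvens word.toList.tail) = true
  · rw [if_pos (hO.mpr ho)]; simp [he, ho]
  · rw [if_neg (fun hc => ho (hO.mp hc)), if_pos (hE.mpr he)]; simp [he, ho]
  · rw [if_pos (hO.mpr ho)]; simp [he, ho]
  · rw [if_neg (fun hc => ho (hO.mp hc)), if_neg (fun hc => he (hE.mp hc))]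
    simp only [Bool.not_eq_true] at he ho
    simp [he, ho]
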